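-- pv_equiv track=rewrite | github.com/satijalab/panhumanpy | src/panhumanpy/preprocessing/data_prep.py | cumulative_split
-- ===== SOURCE A (Python) =====
-- def cumulative_split(string, delimiter="|"):
--     """
--     Gives a cumulative split of a string separated with a delimiter.
--     For example, if the string is "The|sun|is|out." and if the
--     delimiter is '|', the output will be:
--     ['The', 'The|sun', 'The|sun|is', 'The|sun|is|out.']
--
--     Args:
--         string (str): The string to split.
--         delimiter (str): The delimiter to split w.r.t.
--
--     Returns:
--         list: A list of strings as described above.
--     """
--     split = []
--     current = ""
--     for item in string.split(delimiter):
--         current += item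
--         split.append(current)
--         current += delimiter
--
--     return split
-- ===== SOURCE B (Python) =====
-- def cumulative_split(string, delimiter="|"):
--     """Cumulative prefixes of the delimiter-split string, each prefix
--     rebuilt independently by joining a slice of the parts list."""
--     parts = string.split(delimiter)
--     return [delimiter.join(parts[:i + 1]) for i in range(len(parts))]
-- ===== Notes on version B (the rewrite author's own statement) =====
-- stated objective: simpler
-- what changed: B splits once and rebuilds each output element independently as delimiter.join(parts[:i+1]) over an index range, instead of threading a mutable accumulator string through a loop.
import Mathlib
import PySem

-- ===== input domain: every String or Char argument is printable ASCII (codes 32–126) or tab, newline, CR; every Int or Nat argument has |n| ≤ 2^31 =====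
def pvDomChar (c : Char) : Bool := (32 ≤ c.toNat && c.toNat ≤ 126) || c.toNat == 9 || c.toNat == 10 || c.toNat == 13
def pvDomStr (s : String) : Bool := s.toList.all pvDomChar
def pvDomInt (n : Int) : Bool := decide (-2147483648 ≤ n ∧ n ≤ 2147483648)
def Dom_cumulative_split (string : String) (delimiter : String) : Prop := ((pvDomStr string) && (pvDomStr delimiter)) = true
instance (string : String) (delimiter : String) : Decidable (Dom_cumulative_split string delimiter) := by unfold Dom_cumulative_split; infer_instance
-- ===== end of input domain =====

-- B rebuilds each prefix independently by joining a slice of the split parts, instead of A's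
-- mutable accumulator threaded through the loop; same values, different decomposition (objective: simpler).

-- ===== PORT A =====
-- A: split, then a loop with a growing 'current' buffer, appending it after each part.
def cumulative_split (string : String) (delimiter : String) : List String :=
  let parts := (PySem.Chars.split? string.toList delimiter.toList).getD []
  ((parts.foldl
      (fun (st : List (List Char) × List Char) item =>
        (st.1 ++ [st.2 ++ item], st.2 ++ item ++ delimiter.toList))
      ([], [])).1).map String.mk

-- ===== PORT B =====
-- B: split once; element i is delimiter.join(parts[:i+1]), recomputed independently.
def cumulative_split_alt (string : String) (delimiter : String) : List String :=
  let parts := (PySem.Chars.split? string.toList delimiter.toList).getD []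
  ((PySem.List.pyRange 0 (parts.length : Int) 1).map
      (fun i => PySem.Chars.join delimiter.toList
        (PySem.List.slice parts none (some (i + 1))))).map String.mk

-- ===== PRECONDITION & SPEC =====
-- Pre_ excludes only the empty delimiter, on which Python's str.split (in both A and B) raises ValueError.
def Pre_cumulative_split (string : String) (delimiter : String) : Prop := delimiter ≠ ""
instance (string : String) (delimiter : String) : Decidable (Pre_cumulative_split string delimiter) := by unfold Pre_cumulative_split; infer_instance
def pvWitness_cumulative_split : String × String := ("The|sun|is|out.", "|")

def Spec_cumulative_split (string : String) (delimiter : String) (out : List String) : Prop := out = cumulative_split_alt string delimiter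
instance (string : String) (delimiter : String) (out : List String) : Decidable (Spec_cumulative_split string delimiter out) := by unfold Spec_cumulative_split; infer_instance

-- ===== CLAIM (what is proved, stated in full; the proofs are below) =====
def Claim_equal_cumulative_split : Prop := ∀ (string : String) (delimiter : String), Dom_cumulative_split string delimiter → Pre_cumulative_split string delimiter → Spec_cumulative_split string delimiter (cumulative_split string delimiter)

-- ===== LEMMAS AND PROOFS =====

-- A's loop, generalized over the accumulated list and current buffer:
-- the k-th element appended is cur ++ join d (first (k+1) parts).
lemma cumsplit_foldl_eq (d : List Char) :
    ∀ (parts : List (List Char)) (acc : List (List Char)) (cur : List Char),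
      (parts.foldl
        (fun (st : List (List Char) × List Char) item =>
          (st.1 ++ [st.2 ++ item], st.2 ++ item ++ d))
        (acc, cur)).1
      = acc ++ (List.range parts.length).map
          (fun k => cur ++ PySem.Chars.join d (parts.take (k + 1))) := by
  intro parts
  induction parts with
  | nil => intro acc cur; simp
  | cons p rest ih =>
    intro acc cur
    rw [List.foldl_cons, ih]
    simp only [List.length_cons, List.range_succ_eq_map, List.map_cons, List.map_map,
      List.append_assoc, List.singleton_append]
    congr 1
    congr 1
    · simp [PySem.Chars.join_singleton]
    · apply List.map_congr_left
      intro k hk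
      have hne : rest.take (k + 1) ≠ [] := by
        have hk' : k < rest.length := List.mem_range.mp hk
        intro hcontra
        rcases List.take_eq_nil_iff.mp hcontra with h | h
        · exact Nat.succ_ne_zero k h
        · subst h; simp at hk' 
      obtain ⟨q, l, hql⟩ := List.exists_cons_of_ne_nil hne
      simp only [Function.comp_apply, List.take_succ_cons, hql, PySem.Chars.join_cons_cons]
      simp

-- ===== VERDICT (by name: the statement is the Claim_ definition above) =====
theorem cumulative_split_spec : Claim_equal_cumulative_split := by
  intro string delimiter _ _
  simp only [Spec_cumulative_split, cumulative_split, cumulative_split_alt]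
  rw [cumsplit_foldl_eq]
  congr 1
  rw [PySem.List.pyRange_zero_natCast, List.map_map]
  simp only [List.nil_append]
  apply List.map_congr_left
  intro k hk
  have hc : ((k : Int) + 1) = ((k + 1 : Nat) : Int) := by push_cast; ring
  simp only [Function.comp_apply]
  rw [hc, PySem.List.slice_to_natCast]
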